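-- pv_equiv track=rewrite | github.com/WesleyWong420/Build-Your-Own-LOLBins | globfuscation.py | glob_mutate
-- ===== SOURCE A (Python) =====
-- import itertools
--
-- def glob_mutate(subpath):
--     for each_possibility  in itertools.product("?X", repeat=len(subpath)):
--         new_mutation = list(each_possibility)
--         for i, c in enumerate(each_possibility):
--             if c == "X":
--                 new_mutation[i] = subpath[i]
--         to_test = "".join(new_mutation)
--         yield to_test
-- ===== SOURCE B (Python) =====
-- def glob_mutate(subpath):
--     def rec(i):
--         if i == len(subpath):
--             yield ""
--             return
--         for choice in ("?", subpath[i]):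
--             for rest in rec(i + 1):
--                 yield choice + rest
--     yield from rec(0)
-- ===== Notes on version B (the rewrite author's own statement) =====
-- stated objective: simpler
-- what changed: Replaces itertools.product over '?X' plus a second pass that patches 'X' positions back to the real characters with a direct recursive generator that, at each position, prepends '?' and then the real character to every mask of the suffix.
import Mathlib
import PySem

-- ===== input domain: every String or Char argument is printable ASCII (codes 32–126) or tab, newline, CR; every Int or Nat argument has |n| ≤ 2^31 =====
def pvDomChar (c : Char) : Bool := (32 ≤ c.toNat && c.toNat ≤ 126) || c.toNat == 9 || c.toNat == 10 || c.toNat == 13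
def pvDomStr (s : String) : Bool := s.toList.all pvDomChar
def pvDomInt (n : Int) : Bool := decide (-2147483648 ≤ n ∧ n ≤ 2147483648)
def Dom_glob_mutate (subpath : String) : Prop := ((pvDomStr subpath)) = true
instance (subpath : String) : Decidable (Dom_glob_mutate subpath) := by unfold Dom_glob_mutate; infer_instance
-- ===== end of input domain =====

-- B replaces itertools.product plus index patching by a recursive generator that
-- prepends each choice ('?' then the real character) to the masks of the suffix (objective: simpler).
-- A is a generator; both ports return the yielded strings as a list, in yield order.

-- ===== PORT A =====
-- one step of itertools.product: extend every tuple built so far by each element of the pool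
def pvProdStep (acc : List (List Char)) (pool : List Char) : List (List Char) :=
  acc.flatMap (fun t => pool.map (fun y => t ++ [y]))

-- the inner 'for i, c in enumerate(each_possibility): if c == "X": new_mutation[i] = subpath[i]'
-- (the getD default is never used: c = 'X' only occurs at indices i < len(subpath))
def pvFix (cs : List Char) : Nat → List Char → List Char
  | _, [] => []
  | i, c :: rest => (if c = 'X' then cs.getD i c else c) :: pvFix cs (i + 1) rest

def glob_mutate (subpath : String) : List String :=
  ((List.replicate subpath.toList.length ['?', 'X']).foldl pvProdStep [[]]).map
    (fun t => String.ofList (pvFix subpath.toList 0 t))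

-- ===== PORT B =====
-- rec(i) over the remaining suffix: yield "" at the end, else '?'+rest then subpath[i]+rest
def pvRec : List Char → List String
  | [] => [""]
  | c :: rest =>
      (pvRec rest).map (fun s => String.ofList ('?' :: s.toList)) ++
      (pvRec rest).map (fun s => String.ofList (c :: s.toList))

def glob_mutate_alt (subpath : String) : List String := pvRec subpath.toList

-- ===== PRECONDITION & SPEC =====
def Spec_glob_mutate (subpath : String) (out : List String) : Prop := out = glob_mutate_alt subpath
instance (subpath : String) (out : List String) : Decidable (Spec_glob_mutate subpath out) := by unfold Spec_glob_mutate; infer_instance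

-- ===== CLAIM (what is proved, stated in full; the proofs are below) =====
def Claim_equal_glob_mutate : Prop := ∀ (subpath : String), Dom_glob_mutate subpath → Spec_glob_mutate subpath (glob_mutate subpath)

-- ===== LEMMAS AND PROOFS =====

-- the left-to-right product fold factors through the prefix tuples
theorem pvProd_foldl (ps : List (List Char)) (acc : List (List Char)) :
    ps.foldl pvProdStep acc =
      acc.flatMap (fun t => (ps.foldl pvProdStep [[]]).map (fun u => t ++ u)) := by
  induction ps generalizing acc with
  | nil => simp
  | cons p ps ih =>
      simp only [List.foldl_cons]
      rw [ih, ih (pvProdStep [[]] p)]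
      simp [pvProdStep, List.flatMap_map, List.map_flatMap, List.flatMap_assoc, List.map_map, Function.comp_def, List.append_assoc]

-- shifting the enumerate index past a consumed character
theorem pvFix_shift (d : Char) (cs : List Char) (t : List Char) (i : Nat) :
    pvFix (d :: cs) (i + 1) t = pvFix cs i t := by
  induction t generalizing i with
  | nil => rfl
  | cons c rest ih => simp [pvFix, ih]

theorem pvMain (cs : List Char) :
    ((List.replicate cs.length ['?', 'X']).foldl pvProdStep [[]]).map
      (fun t => String.ofList (pvFix cs 0 t)) = pvRec cs := by
  induction cs with
  | nil => rfl
  | cons c cs ih =>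
      have hstep : pvProdStep [[]] ['?', 'X'] = [['?'], ['X']] := rfl
      simp only [List.length_cons, List.replicate_succ, List.foldl_cons, hstep]
      rw [pvProd_foldl]
      simp only [List.flatMap_cons, List.flatMap_nil, List.append_nil, List.map_append,
        List.map_map, Function.comp_def, List.singleton_append]
      have h? : ∀ t, pvFix (c :: cs) 0 ('?' :: t) = '?' :: pvFix cs 0 t := by
        intro t; simp [pvFix, pvFix_shift]
      have hX : ∀ t, pvFix (c :: cs) 0 ('X' :: t) = c :: pvFix cs 0 t := by
        intro t; simp [pvFix, pvFix_shift]
      simp only [h?, hX, pvRec, ← ih, List.map_map, Function.comp_def, String.toList_ofList]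

-- ===== VERDICT (by name: the statement is the Claim_ definition above) =====
theorem glob_mutate_spec : Claim_equal_glob_mutate := by
  intro subpath _
  unfold Spec_glob_mutate glob_mutate glob_mutate_alt
  exact pvMain subpath.toList
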